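-- pv_equiv track=rewrite | github.com/pe3ep/ExamPrep | 9/7635_polyakov/main.py | n2
-- ===== SOURCE A (Python) =====
-- def n2(l: list[int]):
--   psum = 0
--   nsum = 0
--   for i in l:
--     if l.count(i) == 1:
--       nsum += i
--     else:
--       psum += i
--   if psum**2 > nsum**2:
--     return True
--   return False
-- ===== SOURCE B (Python) =====
-- def n2(l: list[int]):
--     cnt = {}
--     for i in l:
--         cnt[i] = cnt.get(i, 0) + 1
--     psum = sum(v * c for v, c in cnt.items() if c > 1)
--     nsum = sum(v for v, c in cnt.items() if c == 1)
--     return psum ** 2 > nsum ** 2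
-- ===== Notes on version B (the rewrite author's own statement) =====
-- stated objective: faster
-- what changed: B builds a count dictionary in one pass and sums over the distinct values, instead of A's inner l.count scan for every element.
import Mathlib
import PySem

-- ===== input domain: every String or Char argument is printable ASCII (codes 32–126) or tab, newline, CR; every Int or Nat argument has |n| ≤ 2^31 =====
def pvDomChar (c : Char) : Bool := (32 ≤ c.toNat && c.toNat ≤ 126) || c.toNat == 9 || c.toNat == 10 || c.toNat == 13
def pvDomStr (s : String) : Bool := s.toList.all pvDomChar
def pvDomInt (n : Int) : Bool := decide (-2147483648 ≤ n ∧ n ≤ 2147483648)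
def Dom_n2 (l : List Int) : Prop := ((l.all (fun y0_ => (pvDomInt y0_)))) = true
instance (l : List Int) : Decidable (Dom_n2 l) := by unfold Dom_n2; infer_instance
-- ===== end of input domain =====

-- B replaces A's per-element l.count scan by one count dictionary built in a single pass (faster).

-- ===== PORT A =====
def n2 (l : List Int) : Bool :=
  let r := l.foldl (fun (s : Int × Int) i =>
      if PySem.List.count l i == 1 then (s.1, s.2 + i) else (s.1 + i, s.2)) (0, 0)
  if r.1 ^ 2 > r.2 ^ 2 then true else false

-- ===== PORT B =====
def n2_alt (l : List Int) : Bool :=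
  let cnt : PySem.Dict Int Int := l.foldl (fun d x => d.insert x (d.getD x 0 + 1)) PySem.Dict.empty
  let psum : Int := cnt.items.foldl (fun a vc => if (1:Int) < vc.2 then a + vc.1 * vc.2 else a) 0
  let nsum : Int := cnt.items.foldl (fun a vc => if vc.2 == (1:Int) then a + vc.1 else a) 0
  decide ((psum ^ 2 : Int) > (nsum ^ 2 : Int))

-- ===== PRECONDITION & SPEC =====
def Spec_n2 (l : List Int) (out : Bool) : Prop := out = n2_alt l
instance (l : List Int) (out : Bool) : Decidable (Spec_n2 l out) := by unfold Spec_n2; infer_instance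

-- ===== CLAIM (what is proved, stated in full; the proofs are below) =====
def Claim_equal_n2 : Prop := ∀ (l : List Int), Dom_n2 l → Spec_n2 l (n2 l)

-- ===== LEMMAS AND PROOFS =====

-- A's loop keeps a (psum, nsum) pair; each component is the sum of an if-image of l.
theorem n2_foldA (c : Int → Bool) (m : List Int) (p n : Int) :
    m.foldl (fun (s : Int × Int) i =>
      if c i then (s.1, s.2 + i) else (s.1 + i, s.2)) (p, n)
    = (p + (m.map fun i => if c i then 0 else i).sum,
       n + (m.map fun i => if c i then i else 0).sum) := by
  induction m generalizing p n with
  | nil => simp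
  | cons x xs ih =>
    cases h : c x <;> simp [h, ih] <;> ring

-- B's two sum loops are sums of if-images of the items list.
theorem n2_foldB (xs : List (Int × Int)) (a : Int) (P : Int × Int → Prop) [DecidablePred P] (g : Int × Int → Int) :
    xs.foldl (fun a vc => if P vc then a + g vc else a) a
    = a + (xs.map fun vc => if P vc then g vc else 0).sum := by
  induction xs generalizing a with
  | nil => simp
  | cons x xs ih =>
    by_cases h : P x <;> simp [h, ih] <;> ring

theorem n2_toFinset_ofList (l : List Int) : (PySem.Set.ofList l).toFinset = l.toFinset := by
  ext x; simp [PySem.Set.mem_ofList]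


-- ===== VERDICT (by name: the statement is the Claim_ definition above) =====
theorem n2_spec : Claim_equal_n2 := by
  intro l _
  unfold Spec_n2 n2 n2_alt
  dsimp only
  rw [PySem.Dict.foldl_insert_getD_add_one_eq_counter, PySem.Dict.items_counter]
  rw [n2_foldA, n2_foldB, n2_foldB]
  simp only [List.map_map, zero_add]
  have hp : (l.map fun i => if PySem.List.count l i == 1 then 0 else i).sum
      = ((PySem.Set.ofList l).map ((fun vc : Int × Int => if (1:Int) < vc.2 then vc.1 * vc.2 else 0) ∘ fun k => (k, (l.count k : Int)))).sum := by
    rw [← List.sum_toFinset _ (PySem.Set.nodup_ofList l), n2_toFinset_ofList,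
        Finset.sum_list_map_count]
    refine Finset.sum_congr rfl fun v hv => ?_
    have h1 : 0 < l.count v := List.count_pos_iff.mpr (List.mem_toFinset.mp hv)
    simp only [PySem.List.count_eq, Function.comp]
    by_cases h : l.count v = 1
    · simp [h]
    · have h2 : (1:Int) < (l.count v : Int) := by omega
      simp [h, h2]
      ring
  have hn : (l.map fun i => if PySem.List.count l i == 1 then i else 0).sum
      = ((PySem.Set.ofList l).map ((fun vc : Int × Int => if vc.2 == (1:Int) then vc.1 else 0) ∘ fun k => (k, (l.count k : Int)))).sum := by
    rw [← List.sum_toFinset _ (PySem.Set.nodup_ofList l), n2_toFinset_ofList,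
        Finset.sum_list_map_count]
    refine Finset.sum_congr rfl fun v hv => ?_
    simp only [PySem.List.count_eq, Function.comp]
    by_cases h : l.count v = 1
    · simp [h]
    · have h2 : ((l.count v : Int) == 1) = false := by simp; omega
      simp [h, h2]
  rw [hp, hn]
  simp
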